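-- pv_equiv track=rewrite | github.com/Hanntheccho/HOI4-BE-GFX-SCRPTS | .SCRPTS/fix_=whitespace.py | normalize_equals_outside_strings
-- ===== SOURCE A (Python) =====
-- def normalize_equals_outside_strings(line: str) -> str:
--     result = []
--     in_single = False
--     in_double = False
--     i = 0
--     while i < len(line):
--         ch = line[i]
--         if ch == '"' and not in_single:
--             in_double = not in_double
--             result.append(ch)
--         elif ch == "'" and not in_double:
--             in_single = not in_single
--             result.append(ch)
--         elif ch == "=" and not (in_single or in_double):
--             prev = line[i - 1] if i > 0 else ""
--             nxt = line[i + 1] if i + 1 < len(line) else ""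
--             if prev not in "=!<>:" and nxt not in "=<>":
--                 while result and result[-1] == " ":
--                     result.pop()
--                 result.append(" = ")
--                 j = i + 1
--                 while j < len(line) and line[j] == " ":
--                     j += 1
--                 i = j
--                 continue
--             else:
--                 result.append(ch)
--         else:
--             result.append(ch)
--         i += 1
--     return "".join(result)
-- ===== SOURCE B (Python) =====
-- def normalize_equals_outside_strings(line: str) -> str:
--     # One forward pass: a pending-space counter replaces A's backward popping,
--     # and a skip flag replaces A's inner space-skipping while loop.
--     out = []        # committed output chunks
--     pend = 0        # run of not-yet-committed trailing spaces
--     in_single = False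
--     in_double = False
--     skip = False    # currently discarding spaces after a normalized '='
--     for i, ch in enumerate(line):
--         if skip:
--             if ch == ' ':
--                 continue
--             skip = False
--         if ch == '"' and not in_single:
--             in_double = not in_double
--         elif ch == "'" and not in_double:
--             in_single = not in_single
--         elif ch == '=' and not in_single and not in_double:
--             prev = line[i - 1] if i > 0 else ""
--             nxt = line[i + 1] if i + 1 < len(line) else ""
--             if prev not in "=!<>:" and nxt not in "=<>":
--                 pend = 0
--                 out.append(" = ")
--                 skip = True
--                 continue
--         if ch == ' ':
--             pend += 1
--         else:
--             out.append(' ' * pend)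
--             pend = 0
--             out.append(ch)
--     return ''.join(out) + ' ' * pend
-- ===== Notes on version B (the rewrite author's own statement) =====
-- stated objective: alternative
-- what changed: B replaces A's backward popping of trailing spaces from the result list and A's inner index-jumping space-skip while loop by a single forward for-loop that keeps a pending-space counter (flushed or discarded when its fate is known) and a skip flag for spaces after a normalized '='.
import Mathlib
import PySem

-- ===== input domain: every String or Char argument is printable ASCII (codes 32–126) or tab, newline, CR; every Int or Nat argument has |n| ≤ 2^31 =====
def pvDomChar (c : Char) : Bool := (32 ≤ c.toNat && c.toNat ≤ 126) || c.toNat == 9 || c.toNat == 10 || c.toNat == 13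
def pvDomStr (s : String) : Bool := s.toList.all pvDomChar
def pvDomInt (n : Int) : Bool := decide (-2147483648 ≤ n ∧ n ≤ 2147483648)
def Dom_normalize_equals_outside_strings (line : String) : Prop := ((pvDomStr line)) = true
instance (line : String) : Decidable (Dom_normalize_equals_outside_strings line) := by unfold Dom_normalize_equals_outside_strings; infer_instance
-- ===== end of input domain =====

-- B replaces A's backward result-popping and inner space-skipping while loop by a single
-- forward pass with a pending-space counter and a skip flag (objective: alternative, same cost).

-- ===== PORT A =====
-- the `while result and result[-1] == " ": result.pop()` loop, as recursion over the reversed result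
def pvPopRev : List (List Char) → List (List Char)
  | [' '] :: t => pvPopRev t
  | r => r

def pvPopSpaces (res : List (List Char)) : List (List Char) :=
  (pvPopRev res.reverse).reverse

-- the `while j < len(line) and line[j] == " ": j += 1` loop, as recursion over the suffix
def pvSkipCount : List Char → Nat
  | ' ' :: t => pvSkipCount t + 1
  | _ => 0

def pvALoop (l : List Char) (i : Nat) (ins ind : Bool) (res : List (List Char)) : List (List Char) :=
  if h : i < l.length then
    let ch := l[i]
    if ch = '"' ∧ ins = false then
      pvALoop l (i+1) ins (!ind) (res ++ [[ch]])
    else if ch = '\'' ∧ ind = false then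
      pvALoop l (i+1) (!ins) ind (res ++ [[ch]])
    else if ch = '=' ∧ ins = false ∧ ind = false then
      -- Python's `"" in "=!<>:"` is True, so i = 0 (prev = "") fails the test; same for nxt at the end
      let prevOk : Bool := if hp : 0 < i then decide (l[i-1] ∉ (['=','!','<','>',':'] : List Char)) else false
      let nxtOk : Bool := if hn : i+1 < l.length then decide (l[i+1] ∉ (['=','<','>'] : List Char)) else false
      if prevOk ∧ nxtOk then
        pvALoop l (i + 1 + pvSkipCount (l.drop (i+1))) ins ind (pvPopSpaces res ++ [[' ','=',' ']])
      else pvALoop l (i+1) ins ind (res ++ [[ch]])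
    else pvALoop l (i+1) ins ind (res ++ [[ch]])
  else res
termination_by l.length - i
decreasing_by all_goals omega

def normalize_equals_outside_strings (line : String) : String :=
  String.ofList (pvALoop line.toList 0 false false []).flatten

-- ===== PORT B =====
-- the common tail of B's loop body: `if ch == ' ': pend += 1 else: flush pend; append ch`
def pvBTail (out : List (List Char)) (pend : Nat) (ins ind : Bool) (ch : Char) :
    List (List Char) × Nat × Bool × Bool × Bool :=
  if ch = ' ' then (out, pend+1, ins, ind, false)
  else (out ++ [List.replicate pend ' ', [ch]], 0, ins, ind, false)

def pvBStep (l : List Char) (st : List (List Char) × Nat × Bool × Bool × Bool)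
    (p : Int × Char) : List (List Char) × Nat × Bool × Bool × Bool :=
  match st with
  | (out, pend, ins, ind, skip) =>
    if skip ∧ p.2 = ' ' then (out, pend, ins, ind, skip)
    else
      if p.2 = '"' ∧ ins = false then pvBTail out pend ins (!ind) p.2
      else if p.2 = '\'' ∧ ind = false then pvBTail out pend (!ins) ind p.2
      else if p.2 = '=' ∧ ins = false ∧ ind = false then
        let prev : Option Char := if 0 < p.1 then PySem.List.pyGet? l (p.1 - 1) else none
        let nxt : Option Char := if p.1 + 1 < (l.length : Int) then PySem.List.pyGet? l (p.1 + 1) else none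
        let prevOk : Bool := match prev with
          | some c => decide (c ∉ (['=','!','<','>',':'] : List Char))
          | none => false
        let nxtOk : Bool := match nxt with
          | some c => decide (c ∉ (['=','<','>'] : List Char))
          | none => false
        if prevOk ∧ nxtOk then (out ++ [[' ','=',' ']], 0, ins, ind, true)
        else pvBTail out pend ins ind p.2
      else pvBTail out pend ins ind p.2

def normalize_equals_outside_strings_alt (line : String) : String :=
  let l := line.toList
  let st := (PySem.List.enumerate l 0).foldl (pvBStep l) ([], 0, false, false, false)
  String.ofList (st.1.flatten ++ List.replicate st.2.1 ' ')

-- ===== PRECONDITION & SPEC =====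
def Spec_normalize_equals_outside_strings (line : String) (out : String) : Prop := out = normalize_equals_outside_strings_alt line
instance (line : String) (out : String) : Decidable (Spec_normalize_equals_outside_strings line out) := by unfold Spec_normalize_equals_outside_strings; infer_instance

-- ===== CLAIM (what is proved, stated in full; the proofs are below) =====
def Claim_equal_normalize_equals_outside_strings : Prop := ∀ (line : String), Dom_normalize_equals_outside_strings line → Spec_normalize_equals_outside_strings line (normalize_equals_outside_strings line)

-- ===== LEMMAS AND PROOFS =====

-- "finalize" of B's fold state: committed chunks plus the pending spaces
def pvFin (st : List (List Char) × Nat × Bool × Bool × Bool) : List Char :=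
  st.1.flatten ++ List.replicate st.2.1 ' '

theorem pvPopRev_cons_ne (c : List Char) (t : List (List Char)) (h : c ≠ [' ']) :
    pvPopRev (c :: t) = c :: t := by
  rw [pvPopRev.eq_def]
  split
  · rename_i heq; cases heq; exact absurd rfl h
  · rfl

theorem pvPopSpaces_append_ne (res : List (List Char)) (c : List Char) (h : c ≠ [' ']) :
    pvPopSpaces (res ++ [c]) = res ++ [c] := by
  unfold pvPopSpaces
  rw [List.reverse_append, List.reverse_singleton, List.singleton_append,
    pvPopRev_cons_ne _ _ h, List.reverse_cons, List.reverse_reverse]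

theorem pvPopSpaces_append_space (res : List (List Char)) :
    pvPopSpaces (res ++ [[' ']]) = pvPopSpaces res := by
  unfold pvPopSpaces
  rw [List.reverse_append, List.reverse_singleton, List.singleton_append]
  rfl

theorem pvSkipCount_cons_ne (c : Char) (t : List Char) (h : c ≠ ' ') :
    pvSkipCount (c :: t) = 0 := by
  rw [pvSkipCount.eq_def]
  split
  · rename_i heq; cases heq; exact absurd rfl h
  · rfl

theorem pvBStep_skip_off (l : List Char) (out : List (List Char)) (pend : Nat)
    (ins ind : Bool) (p : Int × Char) (h : p.2 ≠ ' ') :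
    pvBStep l (out, pend, ins, ind, true) p = pvBStep l (out, pend, ins, ind, false) p := by
  simp [pvBStep, h]

theorem pvFoldB_skip (l : List Char) (xs : List Char) : ∀ (s : Int) (out : List (List Char))
    (pend : Nat) (ins ind : Bool),
    pvFin ((PySem.List.enumerate xs s).foldl (pvBStep l) (out, pend, ins, ind, true))
      = pvFin ((PySem.List.enumerate (xs.drop (pvSkipCount xs)) (s + (pvSkipCount xs : Int))).foldl
          (pvBStep l) (out, pend, ins, ind, false)) := by
  induction xs with
  | nil =>
    intro s out pend ins ind
    rfl
  | cons c t ih =>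
    intro s out pend ins ind
    by_cases hc : c = ' '
    · subst hc
      rw [PySem.List.enumerate_cons, List.foldl_cons]
      have hstep : pvBStep l (out, pend, ins, ind, true) (s, ' ') = (out, pend, ins, ind, true) := by
        simp [pvBStep]
      rw [hstep, ih (s+1)]
      have hcnt : pvSkipCount (' ' :: t) = pvSkipCount t + 1 := rfl
      rw [hcnt]
      have : s + 1 + (pvSkipCount t : Int) = s + ((pvSkipCount t + 1 : Nat) : Int) := by push_cast; ring
      rw [List.drop_succ_cons, this]
    · rw [pvSkipCount_cons_ne c t hc]
      rw [PySem.List.enumerate_cons, List.foldl_cons, List.drop_zero,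
        PySem.List.enumerate_cons, List.foldl_cons]
      rw [pvBStep_skip_off l out pend ins ind (s, c) hc]
      norm_num


theorem pvBStep_eq_char (l : List Char) (i : Nat) (h : i < l.length)
    (out : List (List Char)) (pend : Nat) (ins ind : Bool)
    (h3 : l[i] = '=' ∧ ins = false ∧ ind = false) :
    pvBStep l (out, pend, ins, ind, false) ((i : Int), l[i]) =
      (if (if hp : 0 < i then decide (l[i-1]'(by omega) ∉ (['=','!','<','>',':'] : List Char)) else false)
          ∧ (if hn : i+1 < l.length then decide (l[i+1]'(by omega) ∉ (['=','<','>'] : List Char)) else false)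
        then (out ++ [[' ','=',' ']], 0, ins, ind, true)
        else pvBTail out pend ins ind l[i]) := by
  obtain ⟨hc, hs, hd⟩ := h3
  by_cases hp : 0 < i
  · have e1 : (i : Int) - 1 = ((i - 1 : Nat) : Int) := by omega
    have e2 : PySem.List.pyGet? l ((i : Int) - 1) = some (l[i-1]'(by omega)) := by
      rw [e1, PySem.List.pyGet?_natCast]
      exact List.getElem?_eq_getElem (by omega)
    by_cases hn : i + 1 < l.length
    · have e3 : PySem.List.pyGet? l ((i : Int) + 1) = some (l[i+1]'(by omega)) := by
        have : (i : Int) + 1 = ((i + 1 : Nat) : Int) := by omega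
        rw [this, PySem.List.pyGet?_natCast]
        exact List.getElem?_eq_getElem (by omega)
      have hn' : (i : Int) + 1 < (l.length : Int) := by omega
      simp [pvBStep, hc, hs, hd, hp, hn, hn', e2, e3]
    · have hn' : ¬ ((i : Int) + 1 < (l.length : Int)) := by omega
      simp [pvBStep, hc, hs, hd, hp, hn, hn', e2]
  · have hp' : ¬ ((0 : Int) < (i : Int)) := by omega
    simp [pvBStep, hc, hs, hd, hp]

theorem pvMain (l : List Char) : ∀ (n i : Nat) (ins ind : Bool) (res out : List (List Char)) (pend : Nat),
    l.length - i ≤ n →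
    res.flatten = out.flatten ++ List.replicate pend ' ' →
    (pvPopSpaces res).flatten = out.flatten →
    (pvALoop l i ins ind res).flatten
      = pvFin ((PySem.List.enumerate (l.drop i) (i : Int)).foldl (pvBStep l) (out, pend, ins, ind, false)) := by
  intro n
  induction n with
  | zero =>
    intro i ins ind res out pend hn hres _hpop
    have hge : l.length ≤ i := by omega
    rw [pvALoop, dif_neg (by omega), List.drop_eq_nil_of_le hge]
    simpa [pvFin, PySem.List.enumerate] using hres
  | succ n ih =>
    intro i ins ind res out pend hn hres hpop
    by_cases h : i < l.length
    case neg =>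
      have hge : l.length ≤ i := by omega
      rw [pvALoop, dif_neg (by omega), List.drop_eq_nil_of_le hge]
      simpa [pvFin, PySem.List.enumerate] using hres
    case pos =>
    have hdrop : l.drop i = l[i] :: l.drop (i+1) := List.drop_eq_getElem_cons h
    have hcast : (i : Int) + 1 = ((i+1 : Nat) : Int) := by push_cast; ring
    rw [pvALoop, dif_pos h, hdrop, PySem.List.enumerate_cons, List.foldl_cons]
    by_cases h1 : l[i] = '"' ∧ ins = false
    · have hb : pvBStep l (out, pend, ins, ind, false) ((i:Int), l[i])
          = (out ++ [List.replicate pend ' ', [l[i]]], 0, ins, !ind, false) := by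
        simp [pvBStep, pvBTail, h1.1, h1.2]
      rw [if_pos h1, hb, hcast]
      exact ih (i+1) ins (!ind) _ _ 0 (by omega)
        (by simp [hres])
        (by rw [pvPopSpaces_append_ne _ _ (by simp [h1.1])]; simp [hres])
    by_cases h2 : l[i] = '\'' ∧ ind = false
    · have hb : pvBStep l (out, pend, ins, ind, false) ((i:Int), l[i])
          = (out ++ [List.replicate pend ' ', [l[i]]], 0, !ins, ind, false) := by
        simp [pvBStep, pvBTail, h2.1, h2.2]
      rw [if_neg h1, if_pos h2, hb, hcast]
      exact ih (i+1) (!ins) ind _ _ 0 (by omega)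
        (by simp [hres])
        (by rw [pvPopSpaces_append_ne _ _ (by simp [h2.1])]; simp [hres])
    by_cases h3 : l[i] = '=' ∧ ins = false ∧ ind = false
    · rw [if_neg h1, if_neg h2, if_pos h3, pvBStep_eq_char l i h out pend ins ind h3]
      by_cases hg : ((if hp : 0 < i then decide (l[i-1]'(by omega) ∉ (['=','!','<','>',':'] : List Char)) else false) : Prop)
          ∧ ((if hn : i+1 < l.length then decide (l[i+1]'(by omega) ∉ (['=','<','>'] : List Char)) else false) : Prop)
      · rw [if_pos hg, if_pos hg]
        rw [pvFoldB_skip l (l.drop (i+1)) ((i:Int)+1) _ 0 ins ind]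
        have hdd : (l.drop (i+1)).drop (pvSkipCount (l.drop (i+1)))
            = l.drop (i+1+pvSkipCount (l.drop (i+1))) := by
          rw [List.drop_drop, Nat.add_comm]
        have hc2 : (i:Int) + 1 + (pvSkipCount (l.drop (i+1)) : Int)
            = ((i + 1 + pvSkipCount (l.drop (i+1)) : Nat) : Int) := by push_cast; ring
        rw [hdd, hc2]
        exact ih (i+1+pvSkipCount (l.drop (i+1))) ins ind _ _ 0 (by omega)
          (by simp [hpop])
          (by rw [pvPopSpaces_append_ne _ _ (by simp)]; simp [hpop])
      · have hb : pvBTail out pend ins ind l[i] = (out ++ [List.replicate pend ' ', [l[i]]], 0, ins, ind, false) := by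
          simp [pvBTail, h3.1]
        rw [if_neg hg, if_neg hg, hb, hcast]
        exact ih (i+1) ins ind _ _ 0 (by omega)
          (by simp [hres])
          (by rw [pvPopSpaces_append_ne _ _ (by simp [h3.1])]; simp [hres])
    · rw [if_neg h1, if_neg h2, if_neg h3]
      have hb : pvBStep l (out, pend, ins, ind, false) ((i:Int), l[i]) = pvBTail out pend ins ind l[i] := by
        simp [pvBStep, h1, h2, h3]
      rw [hb]
      by_cases hsp : l[i] = ' '
      · rw [hsp]
        have ht : pvBTail out pend ins ind ' ' = (out, pend+1, ins, ind, false) := by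
          simp [pvBTail]
        rw [ht, hcast]
        exact ih (i+1) ins ind _ _ (pend+1) (by omega)
          (by simp [hres, List.replicate_succ'])
          (by rw [pvPopSpaces_append_space]; exact hpop)
      · have ht : pvBTail out pend ins ind l[i] = (out ++ [List.replicate pend ' ', [l[i]]], 0, ins, ind, false) := by
          simp [pvBTail, hsp]
        rw [ht, hcast]
        exact ih (i+1) ins ind _ _ 0 (by omega)
          (by simp [hres])
          (by rw [pvPopSpaces_append_ne _ _ (by simp [hsp])]; simp [hres])

-- ===== VERDICT (by name: the statement is the Claim_ definition above) =====
theorem normalize_equals_outside_strings_spec : Claim_equal_normalize_equals_outside_strings := by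
  intro line _
  unfold Spec_normalize_equals_outside_strings normalize_equals_outside_strings normalize_equals_outside_strings_alt
  have h := pvMain line.toList line.toList.length 0 false false [] [] 0 (by omega) rfl rfl
  simp only [List.drop_zero, Nat.cast_zero] at h
  rw [h]
  rfl
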